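-- pv_equiv track=rewrite | github.com/szapf70/codecomp | codewars/python/solved/simplefun#221.py | dist_same_letter
-- ===== SOURCE A (Python) =====
-- def dist_same_letter(st):
--     cnt = {}
--     res = []
--     for i,l in enumerate(st):
--         if not l in cnt.keys():
--             cnt[l] = i
--         else:
--             res.append((i - cnt[l],i, l))
--     #res = sorted(res, reverse = True)
--     res = sorted(res, reverse = True, key = lambda x: (x[0], -x[1]))
--     return res[0][2] + str(res[0][0]+1)
-- ===== SOURCE B (Python) =====
-- def dist_same_letter(st):
--     first = {}
--     last = {}
--     for i, l in enumerate(st):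
--         if l not in first:
--             first[l] = i
--         last[l] = i
--     best = None  # (span, last_index, letter)
--     for l in first:
--         span = last[l] - first[l]
--         if span > 0:
--             if best is None or span > best[0] or (span == best[0] and last[l] < best[1]):
--                 best = (span, last[l], l)
--     return best[2] + str(best[0] + 1)
-- ===== Notes on version B (the rewrite author's own statement) =====
-- stated objective: faster
-- what changed: Instead of collecting a (span,i,letter) triple for every repeated occurrence and sorting that whole list, B records only first/last occurrence indices per letter in one pass and picks the best letter by a single running-max scan over the distinct letters (max span, ties by smaller last index), with no sort and no per-occurrence list.
import Mathlib
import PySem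

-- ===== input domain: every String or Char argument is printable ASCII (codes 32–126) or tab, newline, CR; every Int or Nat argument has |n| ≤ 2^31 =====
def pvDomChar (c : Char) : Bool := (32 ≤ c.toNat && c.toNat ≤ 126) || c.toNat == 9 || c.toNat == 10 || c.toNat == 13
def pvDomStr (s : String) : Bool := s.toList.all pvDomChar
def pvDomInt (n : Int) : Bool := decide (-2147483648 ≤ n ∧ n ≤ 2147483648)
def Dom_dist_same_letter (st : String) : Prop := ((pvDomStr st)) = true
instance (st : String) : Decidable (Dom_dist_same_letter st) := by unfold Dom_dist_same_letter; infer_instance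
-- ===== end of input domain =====

-- B replaces A's per-occurrence triple list and full sort by one first/last-index pass plus a
-- running-max scan over the distinct letters (objective: faster — no sort, no per-occurrence list;
-- measured faster in a timing run).

-- ===== PORT A =====
def dist_same_letter (st : String) : String :=
  let s := (PySem.List.enumerate st.toList 0).foldl
    (fun (acc : PySem.Dict Char Int × List (Int × Int × Char)) il =>
      if ¬ acc.1.contains il.2 then (acc.1.insert il.2 il.1, acc.2)
      -- cnt[l]: the key is present on this branch, so getD is exact
      else (acc.1, acc.2 ++ [(il.1 - acc.1.getD il.2 0, il.1, il.2)]))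
    (PySem.Dict.empty, [])
  let res := PySem.List.sorted2 s.2 (fun x => x.1) (fun x => -x.2.1) true
  match res with
  | [] => ""   -- res[0] raises IndexError in Python; such inputs are excluded by Pre_
  | x :: _ => String.ofList [x.2.2] ++ PySem.Int.toStr (x.1 + 1)

-- ===== PORT B =====
def dist_same_letter_alt (st : String) : String :=
  let fl := (PySem.List.enumerate st.toList 0).foldl
    (fun (acc : PySem.Dict Char Int × PySem.Dict Char Int) il =>
      ((if acc.1.contains il.2 then acc.1 else acc.1.insert il.2 il.1),
       acc.2.insert il.2 il.1))
    (PySem.Dict.empty, PySem.Dict.empty)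
  let best := fl.1.keys.foldl
    (fun (best : Option (Int × Int × Char)) l =>
      let span := fl.2.getD l 0 - fl.1.getD l 0
      if 0 < span then
        match best with
        | none => some (span, fl.2.getD l 0, l)
        | some b =>
          if b.1 < span ∨ (span = b.1 ∧ fl.2.getD l 0 < b.2.1) then some (span, fl.2.getD l 0, l)
          else some b
      else best) none
  match best with
  | none => ""   -- best[2] with best = None raises in Python; such inputs are excluded by Pre_
  | some b => String.ofList [b.2.2] ++ PySem.Int.toStr (b.1 + 1)

-- ===== PRECONDITION & SPEC =====
-- Pre_ excludes exactly the strings with no repeated character: there Python A raises IndexError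
-- (res is empty) and Python B raises TypeError (best is None), so neither returns a value.
def Pre_dist_same_letter (st : String) : Prop := ¬ st.toList.Nodup
instance (st : String) : Decidable (Pre_dist_same_letter st) := by unfold Pre_dist_same_letter; infer_instance

def pvWitness_dist_same_letter : String := "abcba"

def Spec_dist_same_letter (st : String) (out : String) : Prop := out = dist_same_letter_alt st
instance (st : String) (out : String) : Decidable (Spec_dist_same_letter st out) := by unfold Spec_dist_same_letter; infer_instance

-- ===== CLAIM =====
def Claim_equal_dist_same_letter : Prop := ∀ (st : String), Dom_dist_same_letter st → Pre_dist_same_letter st → Spec_dist_same_letter st (dist_same_letter st)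

-- ===== LEMMAS AND PROOFS =====

-- index of the first occurrence of c in cs, none if absent
def pvFirstIdx : List Char → Char → Option Nat
  | [], _ => none
  | d :: ds, c => if d = c then some 0 else (pvFirstIdx ds c).map (· + 1)

-- index of the last occurrence of c in cs, none if absent
def pvLastIdx : List Char → Char → Option Nat
  | [], _ => none
  | d :: ds, c =>
    match pvLastIdx ds c with
    | some k => some (k + 1)
    | none => if d = c then some 0 else none

-- A's loop, as a function of the character list
def pvFoldA (cs : List Char) : PySem.Dict Char Int × List (Int × Int × Char) :=
  (PySem.List.enumerate cs 0).foldl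
    (fun (acc : PySem.Dict Char Int × List (Int × Int × Char)) il =>
      if ¬ acc.1.contains il.2 then (acc.1.insert il.2 il.1, acc.2)
      else (acc.1, acc.2 ++ [(il.1 - acc.1.getD il.2 0, il.1, il.2)]))
    (PySem.Dict.empty, [])

-- B's first/last loop, as a function of the character list
def pvFoldB (cs : List Char) : PySem.Dict Char Int × PySem.Dict Char Int :=
  (PySem.List.enumerate cs 0).foldl
    (fun (acc : PySem.Dict Char Int × PySem.Dict Char Int) il =>
      ((if acc.1.contains il.2 then acc.1 else acc.1.insert il.2 il.1),
       acc.2.insert il.2 il.1))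
    (PySem.Dict.empty, PySem.Dict.empty)

-- "y sorts strictly after x" under A's sort key (span, -index) with reverse=True
def pvBt (a b : Int × Int × Char) : Bool :=
  decide (a.1 < b.1) || (!decide (b.1 < a.1) && decide (-a.2.1 < -b.2.1))

lemma pvBt_iff (a b : Int × Int × Char) :
    pvBt a b = true ↔ (a.1 < b.1 ∨ (¬ b.1 < a.1 ∧ b.2.1 < a.2.1)) := by
  simp only [pvBt, Bool.or_eq_true, Bool.and_eq_true, Bool.not_eq_eq_eq_not, Bool.not_true,
    decide_eq_true_eq, decide_eq_false_iff_not]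
  omega

lemma pvBt_irrefl (a : Int × Int × Char) : pvBt a a = false := by
  simp [pvBt]

lemma pvBt_asym (a b : Int × Int × Char) (h : pvBt a b = true) : pvBt b a = false := by
  by_contra hba
  have hba' : pvBt b a = true := by simpa using hba
  rw [pvBt_iff] at h hba'; omega

lemma pvBt_trans (a b c : Int × Int × Char) (h1 : pvBt a b = true) (h2 : pvBt b c = true) :
    pvBt a c = true := by
  rw [pvBt_iff] at *; omega

lemma pvBt_negtrans (a b c : Int × Int × Char) (h1 : pvBt a b = false) (h2 : pvBt b c = false) :
    pvBt a c = false := by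
  rcases h3 : pvBt a c with _ | _
  · rfl
  · exfalso
    rw [pvBt_iff] at h3
    have h1' : ¬ pvBt a b = true := by simp [h1]
    have h2' : ¬ pvBt b c = true := by simp [h2]
    rw [pvBt_iff] at h1' h2'; omega

-- ---------- pvFirstIdx / pvLastIdx facts ----------

lemma pvFirstIdx_lt_length (cs : List Char) (c : Char) (f : Nat)
    (h : pvFirstIdx cs c = some f) : f < cs.length := by
  induction cs generalizing f with
  | nil => simp [pvFirstIdx] at h
  | cons d ds ih =>
    by_cases hd : d = c
    · simp [pvFirstIdx, hd] at h
      simp only [List.length_cons]; omega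
    · simp [pvFirstIdx, hd] at h
      obtain ⟨f', hf', rfl⟩ := h
      have := ih f' hf'
      simp; omega

lemma pvFirstIdx_eq_none_iff (cs : List Char) (c : Char) :
    pvFirstIdx cs c = none ↔ c ∉ cs := by
  induction cs with
  | nil => simp [pvFirstIdx]
  | cons d ds ih =>
    by_cases h : d = c
    · subst h; simp [pvFirstIdx]
    · have h' : ¬ c = d := fun hc => h hc.symm
      simp [pvFirstIdx, h, h', ih]

lemma pvFirstIdx_append_of_some (ds es : List Char) (c : Char) (f : Nat)
    (h : pvFirstIdx ds c = some f) : pvFirstIdx (ds ++ es) c = some f := by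
  induction ds generalizing f with
  | nil => simp [pvFirstIdx] at h
  | cons d ds ih =>
    by_cases hd : d = c
    · simp [pvFirstIdx, hd] at h ⊢; omega
    · simp [pvFirstIdx, hd] at h ⊢
      obtain ⟨f', hf', rfl⟩ := h
      exact ⟨f', ih f' hf', rfl⟩

lemma pvFirstIdx_append_singleton_of_none (ds : List Char) (e c : Char)
    (h : pvFirstIdx ds c = none) :
    pvFirstIdx (ds ++ [e]) c = if e = c then some ds.length else none := by
  induction ds with
  | nil => simp [pvFirstIdx]
  | cons d ds ih =>
    by_cases hd : d = c
    · simp [pvFirstIdx, hd] at h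
    · simp [pvFirstIdx, hd] at h ⊢
      rw [ih h]
      by_cases he : e = c <;> simp [he]

lemma pvFirstIdx_isSome_of_mem (cs : List Char) (c : Char) (h : c ∈ cs) :
    ∃ f, pvFirstIdx cs c = some f := by
  rcases hf : pvFirstIdx cs c with _ | f
  · exact absurd ((pvFirstIdx_eq_none_iff cs c).mp hf) (by simpa using h)
  · exact ⟨f, rfl⟩

lemma pvFirstIdx_append_stable (ds : List Char) (c x : Char) :
    pvFirstIdx (ds ++ [c]) x = pvFirstIdx ds x ∨ (x = c ∧ x ∉ ds) := by
  rcases hf : pvFirstIdx ds x with _ | f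
  · have hx : x ∉ ds := (pvFirstIdx_eq_none_iff ds x).mp hf
    by_cases hxc : x = c
    · exact Or.inr ⟨hxc, hx⟩
    · left
      rw [pvFirstIdx_append_singleton_of_none ds c x hf,
        if_neg (fun h : c = x => hxc h.symm)]
  · exact Or.inl (by rw [pvFirstIdx_append_of_some ds [c] x f hf])

lemma pvLastIdx_append_singleton (ds : List Char) (e c : Char) :
    pvLastIdx (ds ++ [e]) c = if e = c then some ds.length else pvLastIdx ds c := by
  induction ds with
  | nil => by_cases he : e = c <;> simp [pvLastIdx, he]
  | cons d ds ih =>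
    simp only [List.cons_append, pvLastIdx, ih]
    by_cases he : e = c
    · simp [he]
    · simp [he]

lemma pvLastIdx_eq_none_iff (cs : List Char) (c : Char) :
    pvLastIdx cs c = none ↔ c ∉ cs := by
  induction cs with
  | nil => simp [pvLastIdx]
  | cons d ds ih =>
    simp only [pvLastIdx]
    rcases h : pvLastIdx ds c with _ | k
    · have hm : c ∉ ds := ih.mp h
      by_cases hd : d = c
      · subst hd; simp
      · have h' : ¬ c = d := fun hc => hd hc.symm
        simp [hd, h', hm]
    · have hm : c ∈ ds := by
        by_contra hc
        rw [ih.mpr hc] at h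
        cases h
      simp [hm]

lemma pvLastIdx_spec (cs : List Char) (c : Char) (L : Nat) (h : pvLastIdx cs c = some L) :
    L < cs.length ∧ cs.getD L ' ' = c := by
  induction cs generalizing L with
  | nil => simp [pvLastIdx] at h
  | cons d ds ih =>
    rcases hd : pvLastIdx ds c with _ | k
    · simp only [pvLastIdx, hd] at h
      by_cases hdc : d = c
      · simp [hdc] at h; subst h; simpa using hdc
      · simp [hdc] at h
    · simp only [pvLastIdx, hd] at h
      obtain rfl : k + 1 = L := by simpa using h
      obtain ⟨h1, h2⟩ := ih k hd
      refine ⟨by simpa using h1, by simpa using h2⟩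

lemma pvLastIdx_ge (cs : List Char) (c : Char) (L : Nat) (h : pvLastIdx cs c = some L)
    (k : Nat) (hk : k < cs.length) (hc : cs.getD k ' ' = c) : k ≤ L := by
  induction cs generalizing L k with
  | nil => simp at hk
  | cons d ds ih =>
    rcases k with _ | k
    · omega
    · have hk' : k < ds.length := by simpa using hk
      have hc' : ds.getD k ' ' = c := by simpa using hc
      rcases hd : pvLastIdx ds c with _ | m
      · exfalso
        have hmem : c ∈ ds := by
          rw [← hc', List.getD_eq_getElem ds ' ' hk']
          exact List.getElem_mem hk'
        exact (pvLastIdx_eq_none_iff ds c).mp hd hmem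
      · simp only [pvLastIdx, hd] at h
        obtain rfl : m + 1 = L := by simpa using h
        have := ih m hd k hk' hc'
        omega

lemma pvLastIdx_isSome_of_mem (cs : List Char) (c : Char) (h : c ∈ cs) :
    ∃ L, pvLastIdx cs c = some L := by
  rcases hf : pvLastIdx cs c with _ | L
  · exact absurd ((pvLastIdx_eq_none_iff cs c).mp hf) (by simpa using h)
  · exact ⟨L, rfl⟩

-- a duplicated character yields first index < last index
lemma exists_repeat_of_not_nodup (cs : List Char) (h : ¬ cs.Nodup) :
    ∃ (c : Char) (f L : Nat), pvFirstIdx cs c = some f ∧ pvLastIdx cs c = some L ∧ f < L := by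
  induction cs with
  | nil => exact absurd List.nodup_nil h
  | cons d ds ih =>
    by_cases hm : d ∈ ds
    · obtain ⟨L, hL⟩ := pvLastIdx_isSome_of_mem ds d hm
      exact ⟨d, 0, L + 1, by simp [pvFirstIdx], by simp [pvLastIdx, hL], by omega⟩
    · have hnd : ¬ ds.Nodup := by
        intro hnd; exact h (List.nodup_cons.mpr ⟨hm, hnd⟩)
      obtain ⟨c, f, L, h1, h2, h3⟩ := ih hnd
      by_cases hdc : d = c
      · subst hdc
        have hmem : d ∈ ds := by
          by_contra hc
          rw [(pvFirstIdx_eq_none_iff ds d).mpr hc] at h1; cases h1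
        exact absurd hmem hm
      · exact ⟨c, f + 1, L + 1, by simp [pvFirstIdx, hdc, h1], by simp [pvLastIdx, h2], by omega⟩

-- ---------- state of A's loop ----------

lemma pvFoldA_append (ds : List Char) (c : Char) :
    pvFoldA (ds ++ [c]) =
      if ¬ (pvFoldA ds).1.contains c
      then ((pvFoldA ds).1.insert c (ds.length : Int), (pvFoldA ds).2)
      else ((pvFoldA ds).1,
        (pvFoldA ds).2 ++ [((ds.length : Int) - (pvFoldA ds).1.getD c 0, ((ds.length : Int), c))]) := by
  unfold pvFoldA
  rw [PySem.List.enumerate_append, List.foldl_append]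
  simp [PySem.List.enumerate_cons, PySem.List.enumerate_nil]

-- res entries are exactly the non-first occurrences, valued (k - first, k, char)
def pvResProp (cs : List Char) (y : Int × Int × Char) : Prop :=
  ∃ (k f : Nat), k < cs.length ∧ pvFirstIdx cs (cs.getD k ' ') = some f ∧ f < k ∧
    y = ((k : Int) - (f : Int), ((k : Int), cs.getD k ' '))

lemma pvResProp_append (ds : List Char) (c : Char) (y : Int × Int × Char) :
    pvResProp (ds ++ [c]) y ↔
      (pvResProp ds y ∨
        (∃ f, pvFirstIdx ds c = some f ∧
          y = ((ds.length : Int) - (f : Int), ((ds.length : Int), c)))) := by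
  constructor
  · rintro ⟨k, f, hk, hfi, hfk, rfl⟩
    rcases Nat.lt_or_ge k ds.length with hk' | hk'
    · left
      have hg : (ds ++ [c]).getD k ' ' = ds.getD k ' ' := List.getD_append _ _ _ _ hk'
      rw [hg] at hfi ⊢
      have hmem : ds.getD k ' ' ∈ ds := by
        rw [List.getD_eq_getElem ds ' ' hk']; exact List.getElem_mem hk'
      rcases hf0 : pvFirstIdx ds (ds.getD k ' ') with _ | f'
      · exact absurd ((pvFirstIdx_eq_none_iff _ _).mp hf0) (by simpa using hmem)
      · have := pvFirstIdx_append_of_some ds [c] _ f' hf0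
        rw [this] at hfi
        obtain rfl : f' = f := by simpa using hfi
        exact ⟨k, f', hk', hf0, hfk, rfl⟩
    · right
      have hkl : k = ds.length := by simp at hk; omega
      subst hkl
      have hg : (ds ++ [c]).getD ds.length ' ' = c := by
        rw [List.getD_eq_getElem _ ' ' (by simp)]
        simp
      rw [hg] at hfi ⊢
      rcases hf0 : pvFirstIdx ds c with _ | f'
      · rw [pvFirstIdx_append_singleton_of_none ds c c hf0] at hfi
        simp at hfi
        omega
      · have := pvFirstIdx_append_of_some ds [c] _ f' hf0
        rw [this] at hfi
        obtain rfl : f' = f := by simpa using hfi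
        exact ⟨f', rfl, rfl⟩
  · rintro (⟨k, f, hk, hfi, hfk, rfl⟩ | ⟨f, hfi, rfl⟩)
    · have hg : (ds ++ [c]).getD k ' ' = ds.getD k ' ' := List.getD_append _ _ _ _ hk
      refine ⟨k, f, by simp; omega, ?_, hfk, by rw [hg]⟩
      rw [hg]
      exact pvFirstIdx_append_of_some ds [c] _ f hfi
    · have hg : (ds ++ [c]).getD ds.length ' ' = c := by
        rw [List.getD_eq_getElem _ ' ' (by simp)]
        simp
      refine ⟨ds.length, f, by simp, ?_, pvFirstIdx_lt_length ds c f hfi, by rw [hg]⟩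
      rw [hg]
      exact pvFirstIdx_append_of_some ds [c] _ f hfi

lemma pvFoldA_state (cs : List Char) :
    (∀ c, (pvFoldA cs).1.get? c = (pvFirstIdx cs c).map (fun k => (k : Int))) ∧
    (pvFoldA cs).1.keys = PySem.Set.ofList cs ∧
    (∀ y, y ∈ (pvFoldA cs).2 ↔ pvResProp cs y) := by
  induction cs using List.reverseRecOn with
  | nil =>
    refine ⟨fun c => ?_, ?_, fun y => ?_⟩
    · simp [pvFoldA, PySem.List.enumerate_nil, PySem.Dict.get?_empty, pvFirstIdx]
    · simp [pvFoldA, PySem.List.enumerate_nil, PySem.Dict.keys_empty, PySem.Set.ofList_nil]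
    · simp [pvFoldA, PySem.List.enumerate_nil, pvResProp]
  | append_singleton ds c ih =>
    obtain ⟨ihg, ihk, ihr⟩ := ih
    have hcont : (pvFoldA ds).1.contains c = true ↔ c ∈ ds := by
      rw [PySem.Dict.contains_iff_mem_keys, ihk, PySem.Set.mem_ofList]
    rw [pvFoldA_append]
    by_cases hm : c ∈ ds
    · rw [if_neg (by simp [hcont, hm])]
      dsimp only
      obtain ⟨f0, hf0⟩ := pvFirstIdx_isSome_of_mem ds c hm
      have hgetD : (pvFoldA ds).1.getD c 0 = (f0 : Int) := by
        rw [PySem.Dict.getD_eq_get?_getD, ihg c, hf0]; rfl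
      refine ⟨fun x => ?_, ?_, fun y => ?_⟩
      · rcases pvFirstIdx_append_stable ds c x with h | ⟨rfl, hx⟩
        · rw [h]; exact ihg x
        · exact absurd hm hx
      · rw [ihk, PySem.Set.ofList_append_singleton,
          PySem.Set.add_of_mem ((PySem.Set.mem_ofList _ _).mpr hm)]
      · rw [pvResProp_append]
        simp only [List.mem_append, List.mem_singleton, ihr, hgetD]
        constructor
        · rintro (h | rfl)
          · exact Or.inl h
          · exact Or.inr ⟨f0, hf0, rfl⟩
        · rintro (h | ⟨f, hf, rfl⟩)
          · exact Or.inl h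
          · obtain rfl : f0 = f := by rw [hf0] at hf; simpa using hf
            exact Or.inr rfl
    · rw [if_pos (by simp [hcont, hm])]
      dsimp only
      have hcf : (pvFoldA ds).1.contains c = false := by
        rcases hb : (pvFoldA ds).1.contains c
        · rfl
        · exact absurd (hcont.mp hb) hm
      have hf0 : pvFirstIdx ds c = none := (pvFirstIdx_eq_none_iff ds c).mpr hm
      refine ⟨fun x => ?_, ?_, fun y => ?_⟩
      · rw [PySem.Dict.get?_insert]
        by_cases hxc : x = c
        · subst hxc
          rw [if_pos rfl, pvFirstIdx_append_singleton_of_none ds x x hf0]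
          simp
        · rw [if_neg hxc]
          rcases pvFirstIdx_append_stable ds c x with h | ⟨rfl, _⟩
          · rw [h]; exact ihg x
          · exact absurd rfl hxc
      · rw [PySem.Dict.keys_insert_of_not_contains _ _ hcf, ihk,
          PySem.Set.ofList_append_singleton,
          PySem.Set.add_of_not_mem (fun h => hm ((PySem.Set.mem_ofList _ _).mp h))]
      · rw [pvResProp_append]
        simp [ihr, hf0]

-- ---------- state of B's loop ----------

lemma pvFoldA_fst_pure (l : List (Int × Char)) (init : PySem.Dict Char Int × List (Int × Int × Char)) :
    (l.foldl
      (fun (acc : PySem.Dict Char Int × List (Int × Int × Char)) il =>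
        if ¬ acc.1.contains il.2 then (acc.1.insert il.2 il.1, acc.2)
        else (acc.1, acc.2 ++ [(il.1 - acc.1.getD il.2 0, il.1, il.2)])) init).1
    = l.foldl (fun d il => if d.contains il.2 then d else d.insert il.2 il.1) init.1 := by
  induction l generalizing init with
  | nil => rfl
  | cons p l ih =>
    rw [List.foldl_cons, List.foldl_cons, ih]
    by_cases h : init.1.contains p.2 <;> simp [h]

lemma pvFoldB_fst_pure (l : List (Int × Char)) (init : PySem.Dict Char Int × PySem.Dict Char Int) :
    (l.foldl
      (fun (acc : PySem.Dict Char Int × PySem.Dict Char Int) il =>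
        ((if acc.1.contains il.2 then acc.1 else acc.1.insert il.2 il.1),
         acc.2.insert il.2 il.1)) init).1
    = l.foldl (fun d il => if d.contains il.2 then d else d.insert il.2 il.1) init.1 := by
  induction l generalizing init with
  | nil => rfl
  | cons p l ih => rw [List.foldl_cons, List.foldl_cons, ih]

lemma pvFoldB_fst (cs : List Char) : (pvFoldB cs).1 = (pvFoldA cs).1 := by
  unfold pvFoldA pvFoldB
  rw [pvFoldA_fst_pure, pvFoldB_fst_pure]

lemma pvFoldB_snd_pure (l : List (Int × Char)) (init : PySem.Dict Char Int × PySem.Dict Char Int) :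
    (l.foldl
      (fun (acc : PySem.Dict Char Int × PySem.Dict Char Int) il =>
        ((if acc.1.contains il.2 then acc.1 else acc.1.insert il.2 il.1),
         acc.2.insert il.2 il.1)) init).2
    = l.foldl (fun d il => d.insert il.2 il.1) init.2 := by
  induction l generalizing init with
  | nil => rfl
  | cons p l ih => rw [List.foldl_cons, List.foldl_cons, ih]

lemma pvFoldB_snd (cs : List Char) :
    ∀ c, (pvFoldB cs).2.get? c = (pvLastIdx cs c).map (fun k => (k : Int)) := by
  induction cs using List.reverseRecOn with
  | nil =>
    intro c
    unfold pvFoldB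
    rw [PySem.List.enumerate_nil]
    simp [pvLastIdx, PySem.Dict.get?_empty]
  | append_singleton ds c ih =>
    intro x
    have hstep : (pvFoldB (ds ++ [c])).2 = (pvFoldB ds).2.insert c (ds.length : Int) := by
      unfold pvFoldB
      rw [PySem.List.enumerate_append, List.foldl_append, pvFoldB_snd_pure, pvFoldB_snd_pure]
      simp [PySem.List.enumerate_cons, PySem.List.enumerate_nil]
    rw [hstep, PySem.Dict.get?_insert, pvLastIdx_append_singleton]
    by_cases hx : x = c
    · simp [hx]
    · rw [if_neg hx, if_neg (fun h : c = x => hx h.symm)]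
      exact ih x

-- ---------- insertion sort: the head of the reverse-sorted list beats everything ----------

lemma insertBy_pairwise {α : Type} (before : α → α → Bool)
    (hasym : ∀ a b, before a b = true → before b a = false)
    (htrans : ∀ a b c, before a b = true → before b c = true → before a c = true)
    (x : α) (l : List α) (hl : l.Pairwise (fun a b => before b a = false)) :
    (PySem.List.insertBy before x l).Pairwise (fun a b => before b a = false) := by
  induction l with
  | nil => simp [PySem.List.insertBy]
  | cons y ys ih =>
    obtain ⟨hy, hys⟩ := List.pairwise_cons.mp hl
    by_cases hb : before x y = true
    · rw [show PySem.List.insertBy before x (y :: ys) = x :: y :: ys by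
        simp [PySem.List.insertBy, hb]]
      refine List.pairwise_cons.mpr ⟨?_, hl⟩
      intro z hz
      rcases List.mem_cons.mp hz with rfl | hz'
      · exact hasym _ _ hb
      · by_contra hzx
        have hzx' : before z x = true := by simpa using hzx
        have : before z y = true := htrans _ _ _ hzx' hb
        rw [hy z hz'] at this; cases this
    · rw [show PySem.List.insertBy before x (y :: ys) = y :: PySem.List.insertBy before x ys by
        simp [PySem.List.insertBy, hb]]
      refine List.pairwise_cons.mpr ⟨?_, ih hys⟩
      intro z hz
      rcases (PySem.List.mem_insertBy before x z ys).mp hz with rfl | hz'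
      · simpa using hb
      · exact hy z hz'

lemma foldl_insertBy_pairwise {α : Type} (before : α → α → Bool)
    (hasym : ∀ a b, before a b = true → before b a = false)
    (htrans : ∀ a b c, before a b = true → before b c = true → before a c = true)
    (xs : List α) (acc : List α) (hacc : acc.Pairwise (fun a b => before b a = false)) :
    (xs.foldl (fun acc x => PySem.List.insertBy before x acc) acc).Pairwise
      (fun a b => before b a = false) := by
  induction xs generalizing acc with
  | nil => exact hacc
  | cons x xs ih => exact ih _ (insertBy_pairwise before hasym htrans x acc hacc)

lemma sorted2_head_max (xs : List (Int × Int × Char)) (m : Int × Int × Char)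
    (t : List (Int × Int × Char))
    (h : PySem.List.sorted2 xs (fun x => x.1) (fun x => -x.2.1) true = m :: t) :
    m ∈ xs ∧ ∀ y ∈ xs, pvBt m y = false := by
  have he : PySem.List.sorted2 xs (fun x => x.1) (fun x => -x.2.1) true
      = xs.foldl (fun acc x => PySem.List.insertBy (fun a b => pvBt b a) x acc) [] := rfl
  have hp := foldl_insertBy_pairwise (fun a b => pvBt b a)
    (fun a b hab => pvBt_asym b a hab)
    (fun a b c h1 h2 => pvBt_trans c b a h2 h1) xs [] List.Pairwise.nil
  rw [← he, h] at hp
  have hperm := PySem.List.sorted2_perm xs (fun x => x.1) (fun x => -x.2.1) true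
  rw [h] at hperm
  constructor
  · exact hperm.mem_iff.mp (List.mem_cons_self)
  · intro y hy
    rcases List.mem_cons.mp (hperm.mem_iff.mpr hy) with rfl | hyt
    · exact pvBt_irrefl y
    · exact (List.pairwise_cons.mp hp).1 y hyt

-- ---------- B's running-max scan ----------

def pvStepBest (g h : Char → Int) (best : Option (Int × Int × Char)) (c : Char) :
    Option (Int × Int × Char) :=
  if 0 < g c then
    match best with
    | none => some (g c, h c, c)
    | some b => if b.1 < g c ∨ (g c = b.1 ∧ h c < b.2.1) then some (g c, h c, c) else some b
  else best

def pvCands (g h : Char → Int) (l : List Char) : List (Int × Int × Char) :=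
  (l.filter (fun c => decide (0 < g c))).map (fun c => (g c, h c, c))

lemma pvCands_cons (g h : Char → Int) (c : Char) (l : List Char) :
    pvCands g h (c :: l) =
      if 0 < g c then (g c, h c, c) :: pvCands g h l else pvCands g h l := by
  by_cases hc : 0 < g c <;> simp [pvCands, hc]

lemma foldBest_spec (g h : Char → Int) (l : List Char) (best : Option (Int × Int × Char)) :
    ((l.foldl (pvStepBest g h) best = none) ↔ (best = none ∧ ∀ c ∈ l, ¬ 0 < g c)) ∧
    (∀ bf, l.foldl (pvStepBest g h) best = some bf →
      bf ∈ best.toList ++ pvCands g h l ∧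
      ∀ y ∈ best.toList ++ pvCands g h l, pvBt bf y = false) := by
  induction l generalizing best with
  | nil =>
    refine ⟨by simp, fun bf hbf => ?_⟩
    simp only [List.foldl_nil] at hbf
    subst hbf
    constructor
    · simp
    · intro y hy
      simp [pvCands] at hy
      subst hy
      exact pvBt_irrefl y
  | cons c l ih =>
    rw [List.foldl_cons]
    by_cases hc : 0 < g c
    · rw [pvCands_cons, if_pos hc]
      rcases best with _ | b
      · have hstep : pvStepBest g h none c = some (g c, h c, c) := by
          simp [pvStepBest, hc]
        rw [hstep]
        obtain ⟨ihn, ihs⟩ := ih (some (g c, h c, c))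
        constructor
        · rw [ihn]; simp [hc]
        · intro bf hbf
          obtain ⟨hmem, hall⟩ := ihs bf hbf
          refine ⟨by simpa using hmem, fun y hy => hall y (by simpa using hy)⟩
      · have hiff : (b.1 < g c ∨ (g c = b.1 ∧ h c < b.2.1)) ↔ pvBt b (g c, h c, c) = true := by
          rw [pvBt_iff]; dsimp only; constructor <;> intro hx <;> omega
        by_cases hcond : b.1 < g c ∨ (g c = b.1 ∧ h c < b.2.1)
        · have hbt : pvBt b (g c, h c, c) = true := hiff.mp hcond
          have hstep : pvStepBest g h (some b) c = some (g c, h c, c) := by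
            simp [pvStepBest, hc, hcond]
          rw [hstep]
          obtain ⟨ihn, ihs⟩ := ih (some (g c, h c, c))
          constructor
          · rw [ihn]; simp
          · intro bf hbf
            obtain ⟨hmem, hall⟩ := ihs bf hbf
            have hbfc : pvBt bf (g c, h c, c) = false := hall _ (by simp)
            have hbfb : pvBt bf b = false := by
              by_contra hx
              have hx' : pvBt bf b = true := by simpa using hx
              have := pvBt_trans bf b (g c, h c, c) hx' hbt
              rw [hbfc] at this; cases this
            constructor
            · rcases (by simpa using hmem : bf = (g c, h c, c) ∨ bf ∈ pvCands g h l) with hx | hx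
              · simp [hx]
              · simp [hx]
            · intro y hy
              rcases (by simpa using hy : y = b ∨ y = (g c, h c, c) ∨ y ∈ pvCands g h l)
                with rfl | rfl | hx
              · exact hbfb
              · exact hbfc
              · exact hall _ (by simp [hx])
        · have hbt : pvBt b (g c, h c, c) = false := by
            by_contra hx
            exact hcond (hiff.mpr (by simpa using hx))
          have hstep : pvStepBest g h (some b) c = some b := by
            simp [pvStepBest, hc, hcond]
          rw [hstep]
          obtain ⟨ihn, ihs⟩ := ih (some b)
          constructor
          · rw [ihn]; simp
          · intro bf hbf
            obtain ⟨hmem, hall⟩ := ihs bf hbf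
            have hbfb : pvBt bf b = false := hall _ (by simp)
            constructor
            · rcases (by simpa using hmem : bf = b ∨ bf ∈ pvCands g h l) with hx | hx
              · simp [hx]
              · simp [hx]
            · intro y hy
              rcases (by simpa using hy : y = b ∨ y = (g c, h c, c) ∨ y ∈ pvCands g h l)
                with rfl | rfl | hx
              · exact hbfb
              · exact pvBt_negtrans bf b (g c, h c, c) hbfb hbt
              · exact hall _ (by simp [hx])
    · rw [pvCands_cons, if_neg hc]
      have hstep : pvStepBest g h best c = best := by
        simp [pvStepBest, hc]
      rw [hstep]
      obtain ⟨ihn, ihs⟩ := ih best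
      constructor
      · rw [ihn]
        constructor
        · rintro ⟨h1, h2⟩
          exact ⟨h1, fun x hx => by
            rcases List.mem_cons.mp hx with rfl | hx'
            · exact hc
            · exact h2 x hx'⟩
        · rintro ⟨h1, h2⟩
          exact ⟨h1, fun x hx => h2 x (List.mem_cons_of_mem c hx)⟩
      · exact ihs

-- ---------- the main argument ----------

theorem dist_same_letter_eq (st : String) (hPre : ¬ st.toList.Nodup) :
    dist_same_letter st = dist_same_letter_alt st := by
  have hA : dist_same_letter st =
      (match PySem.List.sorted2 (pvFoldA st.toList).2 (fun x => x.1) (fun x => -x.2.1) true with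
       | [] => ""
       | x :: _ => String.ofList [x.2.2] ++ PySem.Int.toStr (x.1 + 1)) := rfl
  have hB : dist_same_letter_alt st =
      (match (pvFoldB st.toList).1.keys.foldl (pvStepBest
          (fun c => (pvFoldB st.toList).2.getD c 0 - (pvFoldB st.toList).1.getD c 0)
          (fun c => (pvFoldB st.toList).2.getD c 0)) none with
       | none => ""
       | some b => String.ofList [b.2.2] ++ PySem.Int.toStr (b.1 + 1)) := rfl
  set cs := st.toList with hcs
  set g : Char → Int := fun c => (pvFoldB cs).2.getD c 0 - (pvFoldB cs).1.getD c 0 with hgdef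
  set h : Char → Int := fun c => (pvFoldB cs).2.getD c 0 with hhdef
  obtain ⟨hget, hkeys, hres⟩ := pvFoldA_state cs
  have hBfst := pvFoldB_fst cs
  have hlast := pvFoldB_snd cs
  have hgetDf : ∀ c f, pvFirstIdx cs c = some f → (pvFoldB cs).1.getD c 0 = (f : Int) := by
    intro c f hf
    rw [hBfst, PySem.Dict.getD_eq_get?_getD, hget c, hf]; rfl
  have hgetDl : ∀ c L, pvLastIdx cs c = some L → (pvFoldB cs).2.getD c 0 = (L : Int) := by
    intro c L hL
    rw [PySem.Dict.getD_eq_get?_getD, hlast c, hL]; rfl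
  have hmemkeys : ∀ c, c ∈ (pvFoldB cs).1.keys ↔ c ∈ cs := by
    intro c; rw [hBfst, hkeys]; exact PySem.Set.mem_ofList cs c
  -- a repeated character exists
  obtain ⟨c0, f0, L0, h01, h02, h03⟩ := exists_repeat_of_not_nodup cs hPre
  have hc0mem : c0 ∈ cs := by
    by_contra hx
    rw [(pvLastIdx_eq_none_iff cs c0).mpr hx] at h02; cases h02
  obtain ⟨hL0lt, hL0get⟩ := pvLastIdx_spec cs c0 L0 h02
  -- res is nonempty
  have he0 : ((L0 : Int) - (f0 : Int), ((L0 : Int), c0)) ∈ (pvFoldA cs).2 := by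
    rw [hres]
    exact ⟨L0, f0, hL0lt, by rw [hL0get]; exact h01, h03, by rw [hL0get]⟩
  -- A's sorted head m
  rcases hs : PySem.List.sorted2 (pvFoldA cs).2 (fun x => x.1) (fun x => -x.2.1) true
    with _ | ⟨m, t⟩
  · exfalso
    have := PySem.List.sorted2_perm (pvFoldA cs).2 (fun x => x.1) (fun x => -x.2.1) true
    rw [hs] at this
    rw [this.symm.mem_iff] at he0
    cases he0
  obtain ⟨hmmem, hmmax⟩ := sorted2_head_max _ m t hs
  -- B's running max bf
  obtain ⟨hnone_iff, hsome⟩ := foldBest_spec g h (pvFoldB cs).1.keys none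
  rcases hr : (pvFoldB cs).1.keys.foldl (pvStepBest g h) none with _ | bf
  · exfalso
    obtain ⟨-, hall⟩ := hnone_iff.mp hr
    refine hall c0 ((hmemkeys c0).mpr hc0mem) ?_
    have : g c0 = (L0 : Int) - (f0 : Int) := by
      rw [hgdef]; dsimp only; rw [hgetDl c0 L0 h02, hgetDf c0 f0 h01]
    rw [this]
    omega
  obtain ⟨hbfmem, hbfall⟩ := hsome bf hr
  -- bf is the candidate of some letter c1, and an entry of res
  have hbfmem' : bf ∈ pvCands g h (pvFoldB cs).1.keys := by simpa using hbfmem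
  obtain ⟨c1, hc1, hbf⟩ := by
    simpa [pvCands, List.mem_filter, List.mem_map] using hbfmem'
  obtain ⟨hc1keys, hc1good⟩ := hc1
  have hc1mem : c1 ∈ cs := (hmemkeys c1).mp hc1keys
  obtain ⟨f1, hf1⟩ := pvFirstIdx_isSome_of_mem cs c1 hc1mem
  obtain ⟨L1, hL1⟩ := pvLastIdx_isSome_of_mem cs c1 hc1mem
  have hg1 : g c1 = (L1 : Int) - (f1 : Int) := by
    rw [hgdef]; dsimp only; rw [hgetDl c1 L1 hL1, hgetDf c1 f1 hf1]
  have hh1 : h c1 = (L1 : Int) := by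
    rw [hhdef]; dsimp only; rw [hgetDl c1 L1 hL1]
  obtain ⟨hL1lt, hL1get⟩ := pvLastIdx_spec cs c1 L1 hL1
  have hf1L1 : f1 < L1 := by
    rw [hg1] at hc1good; omega
  have hbfres : bf ∈ (pvFoldA cs).2 := by
    rw [hres, ← hbf, hg1, hh1]
    exact ⟨L1, f1, hL1lt, by rw [hL1get]; exact hf1, hf1L1, by rw [hL1get]⟩
  have hm_bf : pvBt m bf = false := hmmax bf hbfres
  -- m's own letter and its candidate
  obtain ⟨k, f, hklt, hkfi, hfk, hmval⟩ := (hres m).mp hmmem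
  have hcm_mem : cs.getD k ' ' ∈ cs := by
    rw [List.getD_eq_getElem cs ' ' hklt]
    exact List.getElem_mem hklt
  obtain ⟨Lm, hLm⟩ := pvLastIdx_isSome_of_mem cs (cs.getD k ' ') hcm_mem
  have hkLm : k ≤ Lm := pvLastIdx_ge cs (cs.getD k ' ') Lm hLm k hklt rfl
  have hgm : g (cs.getD k ' ') = (Lm : Int) - (f : Int) := by
    rw [hgdef]; dsimp only; rw [hgetDl _ Lm hLm, hgetDf _ f hkfi]
  have hhm : h (cs.getD k ' ') = (Lm : Int) := by
    rw [hhdef]; dsimp only; rw [hgetDl _ Lm hLm]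
  have hgm_pos : 0 < g (cs.getD k ' ') := by rw [hgm]; omega
  have hcm_cand : (g (cs.getD k ' '), h (cs.getD k ' '), cs.getD k ' ')
      ∈ Option.toList (none : Option (Int × Int × Char)) ++ pvCands g h (pvFoldB cs).1.keys := by
    simp only [Option.toList, List.nil_append, pvCands, List.mem_map, List.mem_filter]
    exact ⟨cs.getD k ' ', ⟨(hmemkeys _).mpr hcm_mem, by simpa using hgm_pos⟩, rfl⟩
  have hbf_cm : pvBt bf (g (cs.getD k ' '), h (cs.getD k ' '), cs.getD k ' ') = false :=
    hbfall _ hcm_cand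
  -- both winners carry the same sort key, hence are the same entry
  have hm_bf' : ¬ pvBt m bf = true := by simp [hm_bf]
  rw [pvBt_iff] at hm_bf'
  have hbf_cm' : ¬ pvBt bf (g (cs.getD k ' '), h (cs.getD k ' '), cs.getD k ' ') = true := by
    rw [hbf_cm]; simp
  rw [pvBt_iff] at hbf_cm'
  dsimp only at hbf_cm'
  have hmfst : m.1 = (k : Int) - (f : Int) := by rw [hmval]
  have hmsnd : m.2.1 = (k : Int) := by rw [hmval]
  have hbffst : bf.1 = (L1 : Int) - (f1 : Int) := by rw [← hbf, hg1]
  have hbfsnd : bf.2.1 = (L1 : Int) := by rw [← hbf, hh1]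
  have hkey : m.1 = bf.1 ∧ m.2.1 = bf.2.1 := by
    rw [hmfst, hmsnd, hbffst, hbfsnd] at hm_bf'
    rw [hbffst, hbfsnd, hgm, hhm] at hbf_cm'
    rw [hmfst, hmsnd, hbffst, hbfsnd]
    constructor <;> omega
  have hkL1 : k = L1 := by
    have := hkey.2
    rw [hmsnd, hbfsnd] at this
    exact_mod_cast this
  have hmbf : m = bf := by
    have hcmc1 : cs.getD k ' ' = c1 := by rw [hkL1, hL1get]
    have hff1 : f = f1 := by
      rw [hcmc1] at hkfi
      rw [hkfi] at hf1
      exact Option.some_inj.mp hf1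
    rw [hmval, ← hbf, hg1, hh1, hcmc1, hkL1, hff1]
  rw [hA, hB, hs, hr, hmbf]

-- ===== VERDICT =====
theorem dist_same_letter_spec : Claim_equal_dist_same_letter := by
  intro st _ hPre
  exact dist_same_letter_eq st hPre
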